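-- pv_equiv track=rewrite | github.com/Benjamin-via/TP5-Vialaret.B-et-Pradelles.J- | bienvenue/welcome.py | hello17
-- ===== SOURCE A (Python) =====
-- def hello17(nom):
--     tableauNom = plusieurNom17(nom)
--     for i in range(0, len(tableauNom)):
--         carac = list(tableauNom[i])
--         tableauNom[i] = premiereEnMaj(tableauNom[i], carac)
--     tableauCompter = compt(tableauNom)
--     if helloWorld(tableauCompter) == 0:
--         affichage = 'Hello'
--         return affichage + affichageStandar(tableauCompter)
--     else:
--         return helloWorld(tableauCompter)
--
-- def affichageStandar(tableauCompter):
--     affichage =''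
--     for i in range(0, len(tableauCompter) - 1):
--         if tableauCompter[i][1] == 1:
--             affichage = affichage + ', ' + tableauCompter[i][0]
--         else:
--             affichage = affichage + ', ' + tableauCompter[i][0] + ' (x' + str(tableauCompter[i][1]) + ')'
--     if tableauCompter[len(tableauCompter) - 1][1] == 1:
--         affichage = affichage + ' and ' + tableauCompter[len(tableauCompter) - 1][0] + '.'
--     else:
--         affichage = affichage + ' and ' + tableauCompter[len(tableauCompter) - 1][0] + ' (x' + str(
--             tableauCompter[len(tableauCompter) - 1][1]) + ').'
--     return affichage
--
-- def helloWorld(tableauCompter):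
--     tousEnMaj = 1
--     for i in tableauCompter:
--         if nomMaj(i[0]) == 0:
--             tousEnMaj = 0
--     if tousEnMaj == 1 and len(tableauCompter) > 5:
--         return  'HELLO, WORLD !'
--     elif len(tableauCompter) > 5:
--         return 'Hello, world !'
--     else:
--         return 0
--
-- def nomMaj(carac):
--     nomEnMaj = 1
--     for i in carac:
--         if ord(i) >= 97:
--             nomEnMaj = 0
--     return nomEnMaj
--
-- def plusieurNom17(nom):
--     tableauNom = nom.replace(' ','').split('"')
--     return tableauNom
--
-- def premiereEnMaj(nom, carac):
--     if ord(carac[0]) >= 97: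
--         codeascii = ord(carac[0]) - 32
--         carac[0] = chr(codeascii)
--         nom = "".join(carac)
--     return nom
--
-- def compt(tableauNom):
--     listeTuple = []
--     for i in tableauNom:
--         exist = 0
--         for j in listeTuple:
--             if i == j[0]:
--                 exist = 1
--         if exist == 0:
--             listeTuple.append((i,tableauNom.count(i)))
--     return listeTuple
-- ===== SOURCE B (Python) =====
-- def hello17(nom):
--     names = [_cap(p) for p in nom.replace(' ', '').split('"')]
--     items = _tally(names)
--     if len(items) > 5:
--         if all(ord(c) < 97 for n, _ in items for c in n):
--             return 'HELLO, WORLD !'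
--         return 'Hello, world !'
--     return 'Hello' + _fmt(items)
--
--
-- def _cap(s):
--     return s if s[0] < 'a' else chr(ord(s[0]) - 32) + s[1:]
--
--
-- def _tally(names):
--     # count-and-filter recursion: take the first name, count it by how much the
--     # list shrinks when it is removed, recurse on the remainder
--     if not names:
--         return []
--     head = names[0]
--     rest = [n for n in names if n != head]
--     return [(head, len(names) - len(rest))] + _tally(rest)
--
--
-- def _fmt(items):
--     # recursive assembly: the base case formats the final item, earlier items recurse
--     n, k = items[0]
--     word = n if k == 1 else n + ' (x' + str(k) + ')'
--     if len(items) == 1: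
--         return ' and ' + word + '.'
--     return ', ' + word + _fmt(items[1:])
-- ===== Notes on version B (the rewrite author's own statement) =====
-- stated objective: faster
-- what changed: B replaces A's counting (nested membership scan over the accumulator plus a full list.count per new name) by a count-and-filter recursion that takes the first name, measures its count as how much the list shrinks when it is filtered out, and recurses on the shrinking remainder; formatting is a head-consuming recursion with the final item as base case instead of A's index loop with a duplicated last-element branch.
-- outside the precondition, e.g. on hello17('"'): A raises IndexError, B raises IndexError; on hello17(''): A raises IndexError, B raises IndexError; on hello17(' '): A raises IndexError, B raises IndexError
import Mathlib
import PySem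

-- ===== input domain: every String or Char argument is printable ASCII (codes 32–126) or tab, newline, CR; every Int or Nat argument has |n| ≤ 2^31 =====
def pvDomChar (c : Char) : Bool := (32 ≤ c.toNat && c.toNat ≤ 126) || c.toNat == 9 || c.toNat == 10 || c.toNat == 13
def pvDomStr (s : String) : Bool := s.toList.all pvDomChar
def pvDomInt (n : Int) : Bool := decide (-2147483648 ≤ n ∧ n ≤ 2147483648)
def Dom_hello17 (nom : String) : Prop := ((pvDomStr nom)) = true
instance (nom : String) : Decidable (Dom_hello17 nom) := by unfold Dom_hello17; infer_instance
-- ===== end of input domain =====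

-- B replaces A's counting (accumulator membership scan + list.count per new name) by a
-- count-and-filter recursion, and A's index-driven formatting loop by a head-consuming
-- recursion; same return value wherever A returns (on inputs with an empty name piece,
-- such as '"' or the empty string, both Pythons raise IndexError; outside Pre_).

-- ===== PORT A =====
-- for-loop body of hello17: list(name), uppercase first char if ord ≥ 97, join back
def premiereEnMajA (nom : List Char) : List Char :=
  match nom with
  | [] => []          -- Python raises IndexError (carac[0]) here; excluded by Pre_hello17
  | c :: rest => if 97 ≤ c.toNat then Char.ofNat (c.toNat - 32) :: rest else c :: rest

def nomMajA (carac : List Char) : Int :=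
  carac.foldl (fun nomEnMaj i => if 97 ≤ i.toNat then 0 else nomEnMaj) 1

def plusieurNom17A (nom : String) : List (List Char) :=
  (PySem.Chars.split? (PySem.Chars.replace nom.toList [' '] []) ['"']).getD []

def comptA (tableauNom : List (List Char)) : List (List Char × Int) :=
  tableauNom.foldl (fun listeTuple i =>
    let exist : Int := listeTuple.foldl (fun e j => if i == j.1 then 1 else e) 0
    if exist == 0 then listeTuple ++ [(i, (PySem.List.count tableauNom i : Int))]
    else listeTuple) []

-- returns none where the Python returns the sentinel 0
def helloWorldA (t : List (List Char × Int)) : Option (List Char) :=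
  let tousEnMaj : Int := t.foldl (fun m i => if nomMajA i.1 == 0 then 0 else m) 1
  if tousEnMaj == 1 ∧ t.length > 5 then some "HELLO, WORLD !".toList
  else if t.length > 5 then some "Hello, world !".toList
  else none

def affichageStandarA (t : List (List Char × Int)) : List Char :=
  let affichage := (PySem.List.pyRange 0 ((t.length : Int) - 1) 1).foldl
    (fun affichage i =>
      let e := PySem.List.pyGetD t i ([], 0)
      if e.2 == 1 then affichage ++ ", ".toList ++ e.1
      else affichage ++ ", ".toList ++ e.1 ++ " (x".toList ++ PySem.Int.toChars e.2 ++ ")".toList) []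
  let last := PySem.List.pyGetD t ((t.length : Int) - 1) ([], 0)
  if last.2 == 1 then affichage ++ " and ".toList ++ last.1 ++ ".".toList
  else affichage ++ " and ".toList ++ last.1 ++ " (x".toList ++ PySem.Int.toChars last.2 ++ ").".toList

def hello17 (nom : String) : String :=
  let tableauNom := (plusieurNom17A nom).map premiereEnMajA
  let tableauCompter := comptA tableauNom
  match helloWorldA tableauCompter with
  | none => String.ofList ("Hello".toList ++ affichageStandarA tableauCompter)
  | some s => String.ofList s

-- ===== PORT B =====
def capB (s : List Char) : List Char :=
  match s with
  | [] => []          -- Python raises IndexError (s[0]) here; excluded by Pre_hello17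
  | c :: rest => if c.toNat < 97 then c :: rest else Char.ofNat (c.toNat - 32) :: rest

-- count-and-filter recursion: head's count = how much the list shrinks when it is removed
def tallyB (names : List (List Char)) : List (List Char × Int) :=
  match names with
  | [] => []
  | h :: t =>
    let rest := (h :: t).filter (fun n => decide (n ≠ h))
    (h, ((h :: t).length : Int) - (rest.length : Int)) :: tallyB rest
termination_by names.length
decreasing_by
  have h1 : ((h :: t).filter (fun n => decide (n ≠ h))).length ≤ t.length := by
    rw [List.filter_cons_of_neg (by simp)]
    exact List.length_filter_le _ t
  simpa using Nat.lt_succ_of_le h1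

def wordB (p : List Char × Int) : List Char :=
  if p.2 == 1 then p.1 else p.1 ++ " (x".toList ++ PySem.Int.toChars p.2 ++ ")".toList

-- head-consuming recursion; ' and X.' base case for the last element
def fmtRecB : List (List Char × Int) → List Char
  | [] => []          -- never reached: tallyB of the nonempty split is nonempty
  | [p] => " and ".toList ++ wordB p ++ ".".toList
  | p :: q :: rest => ", ".toList ++ wordB p ++ fmtRecB (q :: rest)

def hello17_alt (nom : String) : String :=
  let names := ((PySem.Chars.split? (PySem.Chars.replace nom.toList [' '] []) ['"']).getD []).map capB
  let items := tallyB names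
  if items.length > 5 then
    if items.all (fun p => p.1.all (fun c => decide (c.toNat < 97))) then
      String.ofList "HELLO, WORLD !".toList
    else String.ofList "Hello, world !".toList
  else String.ofList ("Hello".toList ++ fmtRecB items)

-- ===== PRECONDITION & SPEC =====
-- Pre_ excludes exactly the inputs where some piece of nom.replace(' ','').split('"') is
-- empty: there Python A (and Python B) raises IndexError reading the piece's first char.
def Pre_hello17 (nom : String) : Prop :=
  ∀ p ∈ (PySem.Chars.split? (PySem.Chars.replace nom.toList [' '] []) ['"']).getD [], p ≠ []
instance (nom : String) : Decidable (Pre_hello17 nom) := by unfold Pre_hello17; infer_instance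
def pvWitness_hello17 : String := "alice\"bob"

def Spec_hello17 (nom : String) (out : String) : Prop := out = hello17_alt nom
instance (nom : String) (out : String) : Decidable (Spec_hello17 nom out) := by unfold Spec_hello17; infer_instance

-- ===== CLAIM (what is proved, stated in full; the proofs are below) =====
def Claim_equal_hello17 : Prop := ∀ (nom : String), Dom_hello17 nom → Pre_hello17 nom → Spec_hello17 nom (hello17 nom)

-- ===== LEMMAS AND PROOFS =====

theorem splitOn_go_ne_nil (sep : List Char) (fuel : Nat) (l cur : List Char) (acc : List (List Char)) :
    PySem.Chars.splitOn.go sep fuel l cur acc ≠ [] := by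
  induction fuel generalizing l cur acc with
  | zero => simp [PySem.Chars.splitOn.go]
  | succ n ih =>
    cases l with
    | nil => simp [PySem.Chars.splitOn.go]
    | cons c rest =>
      rw [PySem.Chars.splitOn.go]
      split
      · exact ih _ _ _
      · exact ih _ _ _

theorem splitOn_ne_nil (cs sep : List Char) : PySem.Chars.splitOn cs sep ≠ [] := by
  rw [PySem.Chars.splitOn]; exact splitOn_go_ne_nil _ _ _ _ _

-- a sticky flag loop ('once z, always z') computes an existential
theorem foldl_flagP {α : Type} (p : α → Prop) [DecidablePred p] (l : List α) (v z : Int) :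
    l.foldl (fun e j => if p j then z else e) v = if ∃ x ∈ l, p x then z else v := by
  induction l generalizing v with
  | nil => simp
  | cons x l ih =>
    rw [List.foldl_cons, ih]
    by_cases hp : p x <;> by_cases hl : ∃ y ∈ l, p y <;> simp [hp, hl]

theorem cap_eq (s : List Char) : premiereEnMajA s = capB s := by
  cases s with
  | nil => rfl
  | cons c rest =>
    simp only [premiereEnMajA, capB]
    split_ifs with h1 h2 h2 <;> first | rfl | omega

theorem compt_go (full l : List (List Char)) (s : List (List Char)) :
    l.foldl (fun listeTuple i =>
      let exist : Int := listeTuple.foldl (fun e j => if i == j.1 then 1 else e) 0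
      if exist == 0 then listeTuple ++ [(i, (PySem.List.count full i : Int))]
      else listeTuple) (s.map (fun k => (k, (PySem.List.count full k : Int))))
    = (PySem.Set.update s l).map (fun k => (k, (PySem.List.count full k : Int))) := by
  induction l generalizing s with
  | nil => simp [PySem.Set.update]
  | cons i l ih =>
    rw [List.foldl_cons]
    have hflag : (s.map (fun k => (k, (PySem.List.count full k : Int)))).foldl
        (fun e j => if i == j.1 then 1 else e) (0:Int)
        = if i ∈ s then 1 else 0 := by
      rw [foldl_flagP (fun j : List Char × Int => (i == j.1) = true)]
      by_cases hmem : i ∈ s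
      · rw [if_pos (by exact ⟨(i, (PySem.List.count full i : Int)), List.mem_map.mpr ⟨i, hmem, rfl⟩, by simp⟩),
            if_pos hmem]
      · rw [if_neg, if_neg hmem]
        rintro ⟨x, hx, hbeq⟩
        obtain ⟨k, hk, rfl⟩ := List.mem_map.mp hx
        exact hmem ((beq_iff_eq.mp hbeq) ▸ hk)
    by_cases hmem : i ∈ s
    · simp only [hflag, if_pos hmem]
      have hadd : PySem.Set.add s i = s := by simp [PySem.Set.add, hmem]
      have := ih s
      simpa [PySem.Set.update_cons, hadd] using this
    · simp only [hflag, if_neg hmem]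
      have hadd : PySem.Set.add s i = s ++ [i] := by simp [PySem.Set.add, hmem]
      have := ih (s ++ [i])
      simp only [List.map_append, List.map_cons, List.map_nil] at this
      simpa [PySem.Set.update_cons, hadd]

theorem compt_eq (names : List (List Char)) :
    comptA names = (PySem.Set.ofList names).map (fun k => (k, (names.count k : Int))) := by
  have := compt_go names names []
  simpa [comptA, PySem.Set.update, PySem.Set.ofList_eq_foldl, PySem.List.count_eq] using this

-- Set.update over a cons'ed accumulator commutes with the cons when the head never recurs
theorem update_cons_of_not_mem (m : List (List Char)) (a : List Char) (s : List (List Char))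
    (h : a ∉ m) : PySem.Set.update (a :: s) m = a :: PySem.Set.update s m := by
  induction m generalizing s with
  | nil => simp [PySem.Set.update]
  | cons y m ih =>
    have hya : y ≠ a := fun hy => h (hy ▸ List.mem_cons_self)
    have ham : a ∉ m := fun hm => h (List.mem_cons_of_mem _ hm)
    rw [PySem.Set.update_cons, PySem.Set.update_cons]
    have hadd : PySem.Set.add (a :: s) y
        = a :: PySem.Set.add s y := by
      by_cases hys : y ∈ s
      · simp [PySem.Set.add, hys, hya]
      · simp [PySem.Set.add, hys, hya]
    rw [hadd, ih _ ham]

-- elements already in the accumulator may be filtered out of the update list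
theorem update_filter_of_mem (m s : List (List Char)) (x : List Char)
    (h : x ∈ s) : PySem.Set.update s m = PySem.Set.update s (m.filter (fun n => decide (n ≠ x))) := by
  induction m generalizing s with
  | nil => simp
  | cons y m ih =>
    by_cases hyx : y = x
    · subst hyx
      rw [List.filter_cons_of_neg (by simp), PySem.Set.update_cons]
      have : PySem.Set.add s y = s := by simp [PySem.Set.add, h]
      rw [this]; exact ih s h
    · rw [List.filter_cons_of_pos (by simp [hyx]), PySem.Set.update_cons, PySem.Set.update_cons]
      exact ih _ (by by_cases hys : y ∈ s <;> simp [PySem.Set.add, hys, h])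

theorem ofList_cons_filter (h : List Char) (t : List (List Char)) :
    PySem.Set.ofList (h :: t)
      = h :: PySem.Set.ofList (t.filter (fun n => decide (n ≠ h))) := by
  have h1 : PySem.Set.ofList (h :: t) = PySem.Set.update [h] t := by
    simp [PySem.Set.ofList_eq_foldl, PySem.Set.update, PySem.Set.add]
  have h2 : PySem.Set.update [] (t.filter (fun n => decide (n ≠ h)))
      = PySem.Set.ofList (t.filter (fun n => decide (n ≠ h))) := by
    simp [PySem.Set.ofList_eq_foldl, PySem.Set.update]
  have h3 := update_filter_of_mem t [h] h List.mem_cons_self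
  have h4 := update_cons_of_not_mem (t.filter (fun n => decide (n ≠ h))) h []
    (fun hm => by simpa using (List.mem_filter.mp hm).2)
  rw [h1, h3, h4, h2]

theorem length_filter_add_count (h : List Char) (t : List (List Char)) :
    (t.filter (fun n => decide (n ≠ h))).length + t.count h = t.length := by
  induction t with
  | nil => simp
  | cons y t ih =>
    by_cases hy : y = h
    · subst hy
      rw [List.filter_cons_of_neg (by simp), List.count_cons_self, List.length_cons]
      omega
    · rw [List.filter_cons_of_pos (by simp [hy])]
      have hyh : ¬ (h = y) := fun hh => hy hh.symm
      rw [List.length_cons, List.length_cons, List.count_cons]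
      simp only [beq_iff_eq, hy, if_false]
      omega

theorem tally_eq (names : List (List Char)) :
    tallyB names = (PySem.Set.ofList names).map (fun k => (k, (names.count k : Int))) := by
  induction names using tallyB.induct with
  | case1 => simp [tallyB]
  | case2 h t rest ih =>
    rw [tallyB]
    have hrest : (h :: t).filter (fun n => decide (n ≠ h)) = t.filter (fun n => decide (n ≠ h)) := by
      simp
    simp only [rest] at ih ⊢
    rw [hrest] at ih ⊢
    rw [ih, ofList_cons_filter, List.map_cons]
    congr 1
    · have hc := length_filter_add_count h t
      have : (h :: t).count h = t.count h + 1 := by simp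
      rw [this]
      simp only [List.length_cons]
      congr 1
      push_cast
      omega
    · apply List.map_congr_left
      intro k hk
      have hkmem : k ∈ t.filter (fun n => decide (n ≠ h)) := by
        have := (PySem.Set.mem_ofList _ _).mp hk
        exact this
      have hkne : k ≠ h := by simpa using (List.mem_filter.mp hkmem).2
      have hcf : (t.filter (fun n => decide (n ≠ h))).count k = t.count k :=
        List.count_filter (by simp [hkne])
      have hkh : ¬ (h = k) := fun hh => hkne hh.symm
      simp [hcf, hkne, hkh]

theorem compt_ne_nil (names : List (List Char)) (h : names ≠ []) : comptA names ≠ [] := by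
  rw [compt_eq]
  cases names with
  | nil => exact absurd rfl h
  | cons n rest =>
    intro hmap
    have hmem : n ∈ PySem.Set.ofList (n :: rest) :=
      (PySem.Set.mem_ofList _ _).mpr List.mem_cons_self
    rw [List.map_eq_nil_iff.mp hmap] at hmem
    exact absurd hmem List.not_mem_nil

theorem helloWorldA_eq (t : List (List Char × Int)) :
    helloWorldA t = if t.length > 5 then
      (if t.all (fun p => p.1.all (fun c => decide (c.toNat < 97))) then some "HELLO, WORLD !".toList
       else some "Hello, world !".toList)
    else none := by
  unfold helloWorldA
  rw [foldl_flagP (fun i => nomMajA i.1 == 0) t 1 0]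
  have hnm : ∀ x : List Char × Int, nomMajA x.1 = 0 ↔ ∃ c ∈ x.1, 97 ≤ c.toNat := by
    intro x
    unfold nomMajA
    rw [foldl_flagP (fun c => 97 ≤ c.toNat) x.1 1 0]
    by_cases h : ∃ c ∈ x.1, 97 ≤ c.toNat <;> simp [h]
  by_cases hex : ∃ x ∈ t, (nomMajA x.1 == 0) = true
  · rw [if_pos hex]
    have hA : ¬ (t.all (fun p => p.1.all (fun c => decide (c.toNat < 97))) = true) := by
      intro hall
      obtain ⟨x, hx, hn0⟩ := hex
      obtain ⟨c, hc, h97⟩ := (hnm x).mp (beq_iff_eq.mp hn0)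
      have h2 := List.all_eq_true.mp (List.all_eq_true.mp hall x hx) c hc
      have := of_decide_eq_true h2
      omega
    by_cases h5 : t.length > 5 <;> simp [hA, h5]
  · rw [if_neg hex]
    have hA : t.all (fun p => p.1.all (fun c => decide (c.toNat < 97))) = true := by
      rw [List.all_eq_true]
      intro x hx
      rw [List.all_eq_true]
      intro c hc
      apply decide_eq_true
      by_contra hge
      exact hex ⟨x, hx, beq_iff_eq.mpr ((hnm x).mpr ⟨c, hc, by omega⟩)⟩
    by_cases h5 : t.length > 5 <;> simp [hA, h5]

theorem affichage_eq (u : List (List Char × Int)) (e : List Char × Int) :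
    affichageStandarA (u ++ [e])
    = (u.map (fun q => ", ".toList ++ wordB q)).flatten ++ " and ".toList ++ wordB e ++ ".".toList := by
  unfold affichageStandarA
  have hlen : ((u ++ [e]).length : Int) - 1 = (u.length : Int) := by simp
  rw [hlen]
  have hlast : PySem.List.pyGetD (u ++ [e]) (u.length : Int) ([], 0) = e := by
    rw [PySem.List.pyGetD_eq_getElem _ _ (by positivity) (by simp)]
    simp
  rw [hlast]
  have hcongr : (PySem.List.pyRange 0 (u.length : Int) 1).foldl
      (fun affichage i =>
        let e := PySem.List.pyGetD (u ++ [e]) i ([], 0)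
        if e.2 == 1 then affichage ++ ", ".toList ++ e.1
        else affichage ++ ", ".toList ++ e.1 ++ " (x".toList ++ PySem.Int.toChars e.2 ++ ")".toList) []
      = (PySem.List.pyRange 0 (u.length : Int) 1).foldl
      (fun affichage i =>
        (fun aff (q : List Char × Int) => aff ++ (", ".toList ++ wordB q)) affichage (PySem.List.pyGetD u i ([], 0))) [] := by
    apply PySem.List.foldl_congr_mem
    intro acc x hx
    rw [PySem.List.mem_pyRange_one] at hx
    have hget : PySem.List.pyGetD (u ++ [e]) x ([], 0) = PySem.List.pyGetD u x ([], 0) := by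
      rw [PySem.List.pyGetD_eq_getElem _ _ hx.1 (by simp; omega),
          PySem.List.pyGetD_eq_getElem _ _ hx.1 (by exact_mod_cast hx.2)]
      rw [List.getElem_append_left]
    rw [hget]
    simp only [wordB]
    split <;> simp
  rw [hcongr, PySem.List.foldl_pyRange_zero_pyGetD' u ([], 0)
        (fun aff q => aff ++ (", ".toList ++ wordB q)) [],
      PySem.List.foldl_append_eq_flatMap, List.flatMap_def]
  simp only [List.nil_append]
  unfold wordB
  split <;> simp

theorem fmtRec_eq (u : List (List Char × Int)) (e : List Char × Int) :
    fmtRecB (u ++ [e])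
    = (u.map (fun q => ", ".toList ++ wordB q)).flatten ++ " and ".toList ++ wordB e ++ ".".toList := by
  induction u with
  | nil => simp [fmtRecB]
  | cons p u ih =>
    cases u with
    | nil => simp [fmtRecB, wordB]
    | cons q u' =>
      have hstep : fmtRecB (p :: (q :: u') ++ [e])
          = ", ".toList ++ wordB p ++ fmtRecB ((q :: u') ++ [e]) := rfl
      rw [hstep, ih]
      simp

theorem hello17_eq_alt (nom : String) : hello17 nom = hello17_alt nom := by
  have hcap : premiereEnMajA = capB := funext cap_eq
  simp only [hello17, hello17_alt, plusieurNom17A, hcap]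
  set parts := (PySem.Chars.split? (PySem.Chars.replace nom.toList [' '] []) ['"']).getD [] with hp
  have hparts : parts ≠ [] := by
    rw [hp]
    simp only [PySem.Chars.split?]
    exact splitOn_ne_nil _ _
  set names := parts.map capB with hn
  have hnames : names ≠ [] := by
    rw [hn]
    exact fun h => hparts (List.map_eq_nil_iff.mp h)
  rw [tally_eq, ← compt_eq]
  set I := comptA names with hI
  have hIne : I ≠ [] := compt_ne_nil names hnames
  rw [helloWorldA_eq]
  by_cases h5 : I.length > 5
  · rw [if_pos h5, if_pos h5]
    by_cases hall : I.all (fun p => p.1.all (fun c => decide (c.toNat < 97))) <;> simp [hall]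
  · rw [if_neg h5, if_neg h5]
    obtain ⟨u, e, hue⟩ : ∃ u e, I = u ++ [e] := by
      rcases List.eq_nil_or_concat I with h | ⟨u, e, h⟩
      · exact absurd h hIne
      · exact ⟨u, e, by rw [h, List.concat_eq_append]⟩
    show String.ofList ("Hello".toList ++ affichageStandarA I) = _
    rw [hue, affichage_eq, fmtRec_eq]

-- ===== VERDICT (by name: the statement is the Claim_ definition above) =====
theorem hello17_spec : Claim_equal_hello17 := by
  intro nom _ _
  exact hello17_eq_alt nom
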